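-- pv_equiv track=rewrite | github.com/caitaozhan/LeetCode | hashtable/30.substring-with-concatenation-of-all-words.py | match_words
-- ===== SOURCE A (Python) =====
-- import copy
--
-- def match_words(words, words_dict):
--     '''
--     Args:
--         words      -- list<str>
--         words_dict -- dict<str:int>
--     '''
--     words_dict = copy.deepcopy(words_dict)
--     for word in words:
--         count = words_dict.get(word)
--         if count is None:
--             return False
--         words_dict[word] = count - 1
--         if words_dict[word] < 0:
--             return False
--     for word, count in words_dict.items():
--         if count != 0:
--             return False
--     return True
-- ===== SOURCE B (Python) =====
-- def match_words(words, words_dict):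
--     '''
--     Args:
--         words      -- list<str>
--         words_dict -- dict<str:int>
--     '''
--     wc = {}
--     for w in words:
--         wc[w] = wc.get(w, 0) + 1
--     for w in wc:
--         if w not in words_dict:
--             return False
--     for w, c in words_dict.items():
--         if wc.get(w, 0) != c:
--             return False
--     return True
-- ===== Notes on version B (the rewrite author's own statement) =====
-- stated objective: alternative
-- what changed: Instead of deep-copying the dict and decrementing it per word with a mid-loop negativity check plus a final all-zero scan, B builds a count map of the words once and then compares, per dict key, the stored value against the word count (absent words compare against 0).
import Mathlib
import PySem

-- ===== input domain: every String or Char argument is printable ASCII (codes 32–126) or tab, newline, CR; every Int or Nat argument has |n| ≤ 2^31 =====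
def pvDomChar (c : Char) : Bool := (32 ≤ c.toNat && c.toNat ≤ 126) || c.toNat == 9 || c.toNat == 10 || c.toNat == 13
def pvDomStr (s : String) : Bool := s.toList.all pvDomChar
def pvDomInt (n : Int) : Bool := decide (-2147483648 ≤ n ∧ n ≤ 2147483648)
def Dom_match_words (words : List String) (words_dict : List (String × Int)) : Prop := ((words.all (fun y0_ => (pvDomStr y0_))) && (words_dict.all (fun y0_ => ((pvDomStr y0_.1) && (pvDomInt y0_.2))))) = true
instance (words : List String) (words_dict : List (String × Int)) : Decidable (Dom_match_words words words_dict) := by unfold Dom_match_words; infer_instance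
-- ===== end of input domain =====

-- B replaces A's deepcopy-and-decrement pass (with mid-loop negativity check and final
-- all-zero scan) by building a count map of `words` once and comparing it per dict key.

-- ===== PORT A =====
-- the 'for word in words' loop: returns none on an early `return False`, otherwise the
-- mutated dict (copy.deepcopy: the loop works on its own dict value, which is implicit here)
def matchA_loop : List String → PySem.Dict String Int → Option (PySem.Dict String Int)
  | [], d => some d
  | w :: ws, d =>
    match d.get? w with
    | none => none
    | some c =>
      let d' := d.insert w (c - 1)
      if d'.getD w 0 < 0 then none else matchA_loop ws d'

def match_words (words : List String) (words_dict : List (String × Int)) : Bool :=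
  match matchA_loop words (PySem.Dict.ofList words_dict) with
  | none => false
  | some d => d.items.all (fun p => p.2 == 0)   -- the final 'for word, count in …' loop

-- ===== PORT B =====
-- B's first loop: 'wc = {}; for w in words: wc[w] = wc.get(w, 0) + 1'
def bCounter (words : List String) : PySem.Dict String Int :=
  words.foldl (fun m w => m.insert w (m.getD w 0 + 1)) PySem.Dict.empty

def match_words_alt (words : List String) (words_dict : List (String × Int)) : Bool :=
  let d := PySem.Dict.ofList words_dict
  let wc := bCounter words
  if wc.keys.all (fun w => d.contains w) then          -- 'for w in wc: if w not in words_dict: return False'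
    d.items.all (fun p => wc.getD p.1 0 == p.2)        -- 'for w, c in words_dict.items(): …'
  else false

-- ===== PRECONDITION & SPEC =====
def Spec_match_words (words : List String) (words_dict : List (String × Int)) (out : Bool) : Prop := out = match_words_alt words words_dict
instance (words : List String) (words_dict : List (String × Int)) (out : Bool) : Decidable (Spec_match_words words words_dict out) := by unfold Spec_match_words; infer_instance

-- ===== CLAIM (what is proved, stated in full; the proofs are below) =====
def Claim_equal_match_words : Prop := ∀ (words : List String) (words_dict : List (String × Int)), Dom_match_words words words_dict → Spec_match_words words words_dict (match_words words words_dict)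

-- ===== LEMMAS AND PROOFS =====

-- A's loop + final scan, as one Bool (what match_words computes after ofList)
def matchA_res (ws : List String) (d : PySem.Dict String Int) : Bool :=
  match matchA_loop ws d with
  | none => false
  | some d' => d'.items.all (fun p => p.2 == 0)

lemma matchA_res_char (ws : List String) (d : PySem.Dict String Int) (hnd : d.keys.Nodup) :
    matchA_res ws d = true ↔
      (∀ w ∈ ws, d.contains w = true) ∧ ∀ p ∈ d.items, p.2 = (ws.count p.1 : Int) := by
  induction ws generalizing d with
  | nil =>
    simp [matchA_res, matchA_loop, List.all_eq_true]
  | cons w ws ih =>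
    rcases hg : d.get? w with _ | c
    · -- word missing: both sides false
      have hc : d.contains w = false := by
        rw [PySem.Dict.contains_eq_isSome_get?, hg]; rfl
      constructor
      · intro h; simp [matchA_res, matchA_loop, hg] at h
      · rintro ⟨h1, _⟩; exact absurd (h1 w (by simp)) (by simp [hc])
    · have hcw : d.contains w = true := by
        rw [PySem.Dict.contains_eq_isSome_get?, hg]; rfl
      have hmem : (w, c) ∈ d.items := PySem.Dict.mem_items_of_get?_eq_some d hg
      by_cases hneg : c - 1 < 0
      · -- early False: c ≤ 0 but count of w in w::ws is ≥ 1
        have hA : matchA_res (w :: ws) d = false := by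
          simp [matchA_res, matchA_loop, hg, PySem.Dict.getD_insert_self, hneg]
        rw [hA]
        constructor
        · intro h; cases h
        · rintro ⟨_, h2⟩
          have := h2 (w, c) hmem
          simp [List.count_cons_self] at this
          omega
      · -- continue with d' = d.insert w (c-1)
        have hstep : matchA_res (w :: ws) d = matchA_res ws (d.insert w (c - 1)) := by
          simp [matchA_res, matchA_loop, hg, PySem.Dict.getD_insert_self, hneg]
        rw [hstep, ih _ (PySem.Dict.nodup_keys_insert d w (c - 1) hnd)]
        constructor
        · -- facts about d.insert w (c-1) and ws  →  facts about d and w::ws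
          rintro ⟨h1, h2⟩
          refine ⟨fun w' hw' => ?_, fun p hp => ?_⟩
          · rcases List.mem_cons.1 hw' with rfl | hw'
            · exact hcw
            · have h := h1 w' hw'
              rw [PySem.Dict.contains_insert] at h
              rcases Bool.or_eq_true_iff.1 h with h | h
              · simpa [show w' = w from by simpa using h]
              · exact h
          · by_cases hpw : p.1 = w
            · have hq : d.get? p.1 = some p.2 :=
                PySem.Dict.get?_of_mem_items d (by simpa using hp) hnd
              rw [hpw, hg] at hq
              have hpc : p.2 = c := (Option.some.inj hq).symm
              have h := h2 (w, c - 1) (PySem.Dict.mem_items_insert_self d w (c - 1))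
              simp only at h
              rw [hpw, List.count_cons_self, hpc]
              push_cast
              omega
            · have h := h2 p ((PySem.Dict.mem_items_insert d w (c - 1) p).2 (Or.inr ⟨hp, hpw⟩))
              rw [List.count_cons_of_ne (fun he => hpw he.symm)]
              exact h
        · -- facts about d and w::ws  →  facts about d.insert w (c-1) and ws
          rintro ⟨h1, h2⟩
          refine ⟨fun w' hw' => ?_, fun p hp => ?_⟩
          · rw [PySem.Dict.contains_insert]
            simp [h1 w' (by simp [hw'])]
          · rcases (PySem.Dict.mem_items_insert d w (c - 1) p).1 hp with rfl | ⟨hpd, hpne⟩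
            · have h := h2 (w, c) hmem
              simp only [List.count_cons_self] at h
              push_cast at h ⊢
              omega
            · have h := h2 p hpd
              rwa [List.count_cons_of_ne (fun he => hpne he.symm)] at h

lemma keys_bCounter (words : List String) :
    (bCounter words).keys = PySem.Set.ofList words := by
  unfold bCounter
  rw [PySem.Dict.keys_foldl_insert]
  simp [PySem.Dict.keys_empty, PySem.Set.update_nil_left]

lemma getD_bCounter (words : List String) (v : String) :
    (bCounter words).getD v 0 = (words.count v : Int) := by
  unfold bCounter
  rw [PySem.Dict.getD_foldl_insert_add_one]
  simp [PySem.Dict.getD_empty]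

lemma matchB_char (words : List String) (words_dict : List (String × Int)) :
    match_words_alt words words_dict = true ↔
      (∀ w ∈ words, (PySem.Dict.ofList words_dict).contains w = true) ∧
      ∀ p ∈ (PySem.Dict.ofList words_dict).items, p.2 = (words.count p.1 : Int) := by
  have hkm : ∀ x, x ∈ (bCounter words).keys ↔ x ∈ words := by
    intro x
    rw [keys_bCounter]
    exact PySem.Set.mem_ofList words x
  unfold match_words_alt
  cases hc : ((bCounter words).keys.all fun w => (PySem.Dict.ofList words_dict).contains w) with
  | false =>
    rw [if_neg (by simp [hc])]
    simp only [Bool.false_eq_true, false_iff]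
    rintro ⟨h1, _⟩
    have hall : ((bCounter words).keys.all fun w => (PySem.Dict.ofList words_dict).contains w) = true :=
      List.all_eq_true.2 (fun x hx => h1 x ((hkm x).1 hx))
    rw [hc] at hall
    exact absurd hall (by simp)
  | true =>
    rw [if_pos hc]
    have h1 : ∀ w ∈ words, (PySem.Dict.ofList words_dict).contains w = true :=
      fun w hw => (List.all_eq_true.1 hc) w ((hkm w).2 hw)
    simp only [List.all_eq_true, beq_iff_eq, getD_bCounter]
    constructor
    · intro h
      exact ⟨h1, fun p hp => (h p hp).symm⟩
    · rintro ⟨_, h2⟩ p hp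
      exact (h2 p hp).symm

-- ===== VERDICT (by name: the statement is the Claim_ definition above) =====
theorem match_words_spec : Claim_equal_match_words := by
  intro words words_dict _
  unfold Spec_match_words
  have hA : match_words words words_dict = matchA_res words (PySem.Dict.ofList words_dict) := rfl
  rw [hA, Bool.eq_iff_iff,
    matchA_res_char words _ (PySem.Dict.nodup_keys_ofList words_dict),
    matchB_char words words_dict]
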